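-- pv_equiv track=rewrite | github.com/alejandrobarreche/examen_parcial_2_EDA_II | identificadores.py | mirar_la_clave
-- ===== SOURCE A (Python) =====
-- def mirar_la_clave(num1, num2):
--     """
--     Compara dos números (como cadenas) y calcula la cantidad de saltos
--     entre coincidir y no coincidir. Retorna el número de saltos.
--     """
--     saltos = 0
--     ultima_coincidencia = None
--
--     for i in range(len(str(num1))):
--         coincide = int(str(num1)[i]) == int(str(num2)[i])  # Verificar si las cifras coinciden
--
--         if ultima_coincidencia is not None and coincide != ultima_coincidencia:
--             saltos += 1
--
--         ultima_coincidencia = coincide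
--     return saltos
-- ===== SOURCE B (Python) =====
-- def mirar_la_clave(num1, num2):
--     """Run-length decomposition (groupby-style): build the per-digit match
--     sequence, count its maximal runs by recursive run-skipping, and return
--     runs - 1 (the number of jumps)."""
--     m = [int(a) == int(b) for a, b in zip(str(num1), str(num2))]
--
--     def runs(ms):
--         if not ms:
--             return 0
--         rest = ms[1:]
--         while rest and rest[0] == ms[0]:
--             rest = rest[1:]
--         return 1 + runs(rest)
--
--     return max(runs(m) - 1, 0)
-- ===== Notes on version B (the rewrite author's own statement) =====
-- stated objective: alternative
-- what changed: B counts the maximal runs of the per-digit match sequence by recursive run-skipping (groupby-style run-length decomposition) and returns runs - 1, instead of A's single stateful pass that compares each match against the previous one.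
import Mathlib
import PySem

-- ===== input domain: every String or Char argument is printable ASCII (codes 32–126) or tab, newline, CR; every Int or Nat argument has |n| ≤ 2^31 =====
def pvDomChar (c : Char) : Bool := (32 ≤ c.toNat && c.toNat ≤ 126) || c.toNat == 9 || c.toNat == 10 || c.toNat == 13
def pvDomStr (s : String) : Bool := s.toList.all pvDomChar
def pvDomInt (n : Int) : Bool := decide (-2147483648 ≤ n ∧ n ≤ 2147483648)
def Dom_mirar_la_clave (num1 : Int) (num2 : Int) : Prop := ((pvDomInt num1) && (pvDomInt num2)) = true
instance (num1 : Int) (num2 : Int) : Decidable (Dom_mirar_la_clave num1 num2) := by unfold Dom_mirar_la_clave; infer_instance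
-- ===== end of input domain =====

-- B replaces A's stateful transition-counting pass by a run-length decomposition
-- (count maximal runs of the match sequence recursively, answer = runs - 1): an
-- alternative of the same cost, not claimed faster.

-- ===== PORT A =====
-- A's loop, fold over range(len(str(num1))) carrying (saltos, ultima_coincidencia).
-- int(str(num)[i]) is ported as (ofChars? [pyGetD … i ' ']).getD 0; exact under Pre_
-- (both numbers nonnegative and the index in range, so every char is a digit and no exception fires).
def mirar_la_clave (num1 : Int) (num2 : Int) : Int :=
  let s1 := PySem.Int.toChars num1
  let s2 := PySem.Int.toChars num2
  ((PySem.List.pyRange 0 s1.length 1).foldl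
    (fun (st : Int × Option Bool) i =>
      let coincide :=
        (PySem.Int.ofChars? [PySem.List.pyGetD s1 i ' ']).getD 0 ==
        (PySem.Int.ofChars? [PySem.List.pyGetD s2 i ' ']).getD 0
      let saltos :=
        match st.2 with
        | some u => if coincide != u then st.1 + 1 else st.1
        | none => st.1
      (saltos, some coincide))
    (0, none)).1

-- ===== PORT B =====
-- Source B's inner while loop 'rest = ms[1:]; while rest and rest[0] == ms[0]: rest = rest[1:]'
def pvSkipRun (b : Bool) : List Bool → List Bool
  | [] => []
  | c :: t => if c == b then pvSkipRun b t else c :: t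

theorem pvSkipRun_length_le (b : Bool) (l : List Bool) : (pvSkipRun b l).length ≤ l.length := by
  induction l with
  | nil => simp [pvSkipRun]
  | cons c t ih =>
    simp only [pvSkipRun]
    split_ifs
    · simp; omega
    · simp

-- Source B's recursive runs(ms): number of maximal runs of equal values.
def pvRuns : List Bool → Int
  | [] => 0
  | b :: rest => 1 + pvRuns (pvSkipRun b rest)
termination_by l => l.length
decreasing_by
  exact Nat.lt_succ_of_le (pvSkipRun_length_le b rest)

-- Source B: match table m over zip(str(num1), str(num2)), then max(runs(m) - 1, 0).
def mirar_la_clave_alt (num1 : Int) (num2 : Int) : Int :=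
  let s1 := PySem.Int.toChars num1
  let s2 := PySem.Int.toChars num2
  let m := (s1.zip s2).map (fun p =>
    (PySem.Int.ofChars? [p.1]).getD 0 == (PySem.Int.ofChars? [p.2]).getD 0)
  max (pvRuns m - 1) 0

-- ===== PRECONDITION & SPEC =====
-- Pre_: exactly where Python A returns — negative numbers make int('-') raise ValueError,
-- and a longer str(num1) makes str(num2)[i] raise IndexError.
def Pre_mirar_la_clave (num1 : Int) (num2 : Int) : Prop :=
  0 ≤ num1 ∧ 0 ≤ num2 ∧ (PySem.Int.toChars num1).length ≤ (PySem.Int.toChars num2).length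
instance (num1 : Int) (num2 : Int) : Decidable (Pre_mirar_la_clave num1 num2) := by
  unfold Pre_mirar_la_clave; infer_instance
def pvWitness_mirar_la_clave : Int × Int := (123453, 123553)

def Spec_mirar_la_clave (num1 : Int) (num2 : Int) (out : Int) : Prop := out = mirar_la_clave_alt num1 num2
instance (num1 : Int) (num2 : Int) (out : Int) : Decidable (Spec_mirar_la_clave num1 num2 out) := by unfold Spec_mirar_la_clave; infer_instance

-- ===== CLAIM (what is proved, stated in full; the proofs are below) =====
def Claim_equal_mirar_la_clave : Prop := ∀ (num1 : Int) (num2 : Int), Dom_mirar_la_clave num1 num2 → Pre_mirar_la_clave num1 num2 → Spec_mirar_la_clave num1 num2 (mirar_la_clave num1 num2)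

-- ===== LEMMAS AND PROOFS =====

theorem pvRuns_nonneg (l : List Bool) : 0 ≤ pvRuns l := by
  induction l using pvRuns.induct with
  | case1 => simp [pvRuns]
  | case2 b rest ih => simp only [pvRuns]; omega

-- A's interleaved fold, started after its first step, computes runs(b :: m) - 1 + s.
theorem pv_fold_eq_runs (m : List Bool) : ∀ (s : Int) (b : Bool),
    (m.foldl
      (fun (st : Int × Option Bool) c =>
        (match st.2 with
         | some u => if c != u then st.1 + 1 else st.1
         | none => st.1, some c))
      (s, some b)).1
    = s + pvRuns (b :: m) - 1 := by
  induction m with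
  | nil => intro s b; simp [pvRuns, pvSkipRun]
  | cons c rest ih =>
    intro s b
    simp only [List.foldl_cons]
    by_cases h : c = b
    · subst h
      simp only [bne_self_eq_false, ih]
      simp [pvRuns, pvSkipRun]
    · have hb : (c != b) = true := by simp [h]
      simp only [hb, if_true, ih]
      have hs : pvSkipRun b (c :: rest) = c :: rest := by
        simp [pvSkipRun, h]
      simp only [pvRuns, hs]
      ring

-- A's loop shape over any index list with any match function f equals runs - 1 with a floor at 0.
theorem pv_general (R : List Int) (f : Int → Bool) :
    (R.foldl (fun (st : Int × Option Bool) i =>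
        let coincide := f i
        let saltos := match st.2 with
          | some u => if coincide != u then st.1 + 1 else st.1
          | none => st.1
        (saltos, some coincide)) ((0 : Int), (none : Option Bool))).1
    = max (pvRuns (R.map f) - 1) 0 := by
  have hstep : (fun (st : Int × Option Bool) (i : Int) =>
        let coincide := f i
        let saltos := match st.2 with
          | some u => if coincide != u then st.1 + 1 else st.1
          | none => st.1
        (saltos, some coincide))
      = (fun (st : Int × Option Bool) (i : Int) =>
          (fun (st : Int × Option Bool) (c : Bool) =>
            (match st.2 with
             | some u => if c != u then st.1 + 1 else st.1
             | none => st.1, some c)) st (f i)) := rfl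
  have hm := List.foldl_map (f := f)
      (g := fun (st : Int × Option Bool) (c : Bool) =>
        (match st.2 with
         | some u => if c != u then st.1 + 1 else st.1
         | none => st.1, some c)) (l := R) (init := ((0 : Int), (none : Option Bool)))
  rw [hstep, ← hm]
  generalize R.map f = m
  cases m with
  | nil => simp [pvRuns]
  | cons b rest =>
    simp only [List.foldl_cons, pv_fold_eq_runs]
    have h1 : 0 ≤ pvRuns (pvSkipRun b rest) := pvRuns_nonneg _
    simp only [pvRuns]
    omega

-- A's index list of matches equals B's zip-built match table when |s1| ≤ |s2|.
theorem pv_table_eq (s1 s2 : List Char) (h : s1.length ≤ s2.length) :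
    (PySem.List.pyRange 0 s1.length 1).map (fun i =>
      (PySem.Int.ofChars? [PySem.List.pyGetD s1 i ' ']).getD 0 ==
      (PySem.Int.ofChars? [PySem.List.pyGetD s2 i ' ']).getD 0)
    = (s1.zip s2).map (fun p =>
      (PySem.Int.ofChars? [p.1]).getD 0 == (PySem.Int.ofChars? [p.2]).getD 0) := by
  apply List.ext_getElem
  · simp [PySem.List.length_pyRange_one]
    omega
  · intro k hk1 hk2
    simp only [List.getElem_map, PySem.List.getElem_pyRange_one, List.getElem_zip]
    have hk : k < s1.length := by
      simpa [PySem.List.length_pyRange_one] using hk1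
    have e1 : PySem.List.pyGetD s1 ((0 : Int) + k) ' ' = s1[k] := by
      rw [zero_add, PySem.List.pyGetD_natCast]
      exact List.getD_eq_getElem s1 ' ' hk
    have e2 : PySem.List.pyGetD s2 ((0 : Int) + k) ' ' = s2[k]'(by omega) := by
      rw [zero_add, PySem.List.pyGetD_natCast]
      exact List.getD_eq_getElem s2 ' ' (by omega)
    rw [e1, e2]

theorem mirar_la_clave_eq (num1 num2 : Int)
    (h : (PySem.Int.toChars num1).length ≤ (PySem.Int.toChars num2).length) :
    mirar_la_clave num1 num2 = mirar_la_clave_alt num1 num2 := by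
  unfold mirar_la_clave mirar_la_clave_alt
  rw [pv_general, pv_table_eq _ _ h]

-- ===== VERDICT (by name: the statement is the Claim_ definition above) =====
theorem mirar_la_clave_spec : Claim_equal_mirar_la_clave := by
  intro num1 num2 _ hpre
  exact mirar_la_clave_eq num1 num2 hpre.2.2
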